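-- pv_equiv track=rewrite | github.com/RAJATKUMARSINGH527/Plotch.ai-Coding-Test | Question5.py | group_by_owners
-- ===== SOURCE A (Python) =====
-- def group_by_owners(files):
--     result = {}
--
--
--     for file in files:
--         owner = files[file]
--         if owner in result:
--             result[owner].append(file)
--         else:
--             result[owner] = [file]
--
--     return result
-- ===== SOURCE B (Python) =====
-- def group_by_owners(files):
--     owners = dict.fromkeys(files.values())
--     return {owner: [f for f in files if files[f] == owner] for owner in owners}
-- ===== Notes on version B (the rewrite author's own statement) =====
-- stated objective: alternative
-- what changed: A builds the grouping in one fold that appends each file to its owner's bucket; B first computes the distinct owners (dict.fromkeys of the values) and then builds each group by a separate scan of the dict per owner.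
import Mathlib
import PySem

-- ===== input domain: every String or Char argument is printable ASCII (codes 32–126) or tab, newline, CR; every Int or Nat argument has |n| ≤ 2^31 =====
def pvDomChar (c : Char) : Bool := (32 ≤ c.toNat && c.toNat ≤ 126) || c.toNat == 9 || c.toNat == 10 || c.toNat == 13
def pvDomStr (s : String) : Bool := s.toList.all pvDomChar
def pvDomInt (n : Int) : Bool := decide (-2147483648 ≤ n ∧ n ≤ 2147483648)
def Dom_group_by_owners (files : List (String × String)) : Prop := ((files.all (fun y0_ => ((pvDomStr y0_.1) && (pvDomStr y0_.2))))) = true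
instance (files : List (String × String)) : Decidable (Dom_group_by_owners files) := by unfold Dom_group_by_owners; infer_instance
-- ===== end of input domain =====

-- B replaces A's single grouping fold by a two-level decomposition: first the distinct owners
-- (dict.fromkeys of the values), then one scan of the dict per owner collecting its files.

-- ===== PORT A =====
-- A: for file in files (a dict): owner = files[file]; append to result[owner] or start a new list.
-- The dict argument is modelled as PySem.Dict.ofList of the pair list; iterating keys with a
-- lookup is iterating the items.
def group_by_owners (files : List (String × String)) : List (String × List String) :=
  let d := PySem.Dict.ofList files
  (d.items.foldl
    (fun (result : PySem.Dict String (List String)) kv =>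
      let file := kv.1
      let owner := kv.2
      if result.contains owner then result.modify owner [] (fun l => l ++ [file])
      else result.insert owner [file])
    PySem.Dict.empty).items

-- ===== PORT B =====
-- B: owners = dict.fromkeys(files.values()); {owner: [f for f in files if files[f] == owner] for owner in owners}
def group_by_owners_alt (files : List (String × String)) : List (String × List String) :=
  let d := PySem.Dict.ofList files
  let owners := PySem.List.dedup d.values
  owners.map (fun owner => (owner, (d.items.filter (fun p => p.2 == owner)).map (fun p => p.1)))

-- ===== PRECONDITION & SPEC =====
def Spec_group_by_owners (files : List (String × String)) (out : List (String × List String)) : Prop := out = group_by_owners_alt files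
instance (files : List (String × String)) (out : List (String × List String)) : Decidable (Spec_group_by_owners files out) := by unfold Spec_group_by_owners; infer_instance

-- ===== CLAIM (what is proved, stated in full; the proofs are below) =====
def Claim_equal_group_by_owners : Prop := ∀ (files : List (String × String)), Dom_group_by_owners files → Spec_group_by_owners files (group_by_owners files)

-- ===== LEMMAS AND PROOFS =====

-- on a missing key, A's `insert` branch is the same step as `modify`
theorem ins_eq_mod (r : PySem.Dict String (List String)) (k x : String)
    (h : r.contains k = false) : r.insert k [x] = r.modify k [] (fun l => l ++ [x]) := by
  unfold PySem.Dict.modify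
  rw [PySem.Dict.getD_of_not_contains r ([] : List String) h]
  rfl

-- both branches of A's loop body are one `modify` step
theorem step_eq_mod :
    (fun (result : PySem.Dict String (List String)) (kv : String × String) =>
      if result.contains kv.2 then result.modify kv.2 [] (fun l => l ++ [kv.1])
      else result.insert kv.2 [kv.1])
    = fun result kv => result.modify kv.2 [] (fun l => l ++ [kv.1]) := by
  funext r p
  cases h : r.contains p.2 with
  | false => simp [ins_eq_mod r p.2 p.1 h]
  | true => simp

-- characterisation of A's grouping fold over any pair list
theorem fold_items (l : List (String × String)) :
    (l.foldl (fun (result : PySem.Dict String (List String)) kv =>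
        if result.contains kv.2 then result.modify kv.2 [] (fun t => t ++ [kv.1])
        else result.insert kv.2 [kv.1]) PySem.Dict.empty).items
    = (PySem.List.dedup (l.map (fun p => p.2))).map
        (fun o => (o, (l.filter (fun p => p.2 == o)).map (fun p => p.1))) := by
  rw [step_eq_mod]
  have hswap : l.foldl (fun (result : PySem.Dict String (List String)) kv =>
        result.modify kv.2 [] (fun t => t ++ [kv.1])) PySem.Dict.empty
      = (l.map (fun p => (p.2, p.1))).foldl
          (fun (d : PySem.Dict String (List String)) p => d.modify p.1 [] (fun t => t ++ [p.2]))
          PySem.Dict.empty := by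
    rw [List.foldl_map]
  have hnod : (l.foldl (fun (result : PySem.Dict String (List String)) kv =>
        result.modify kv.2 [] (fun t => t ++ [kv.1])) PySem.Dict.empty).keys.Nodup := by
    exact PySem.Dict.nodup_keys_foldl_modify_key l (fun p => p.2) [] _ PySem.Dict.empty
      (by simp)
  have hkeys : (l.foldl (fun (result : PySem.Dict String (List String)) kv =>
        result.modify kv.2 [] (fun t => t ++ [kv.1])) PySem.Dict.empty).keys
      = PySem.List.dedup (l.map (fun p => p.2)) := by
    rw [PySem.Dict.keys_foldl_modify_key]
    simp [PySem.Dict.keys_empty, PySem.Set.update_nil_left]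
  have hget : ∀ o, (l.foldl (fun (result : PySem.Dict String (List String)) kv =>
        result.modify kv.2 [] (fun t => t ++ [kv.1])) PySem.Dict.empty).getD o []
      = (l.filter (fun p => p.2 == o)).map (fun p => p.1) := by
    intro o
    rw [hswap, PySem.Dict.getD_foldl_modify_append]
    simp only [PySem.Dict.getD_empty, List.filter_map, List.map_map, List.nil_append]
    rfl
  rw [PySem.Dict.items_eq_map_keys _ hnod ([] : List String), hkeys]
  exact List.map_congr_left (fun o _ => by rw [hget o])

-- ===== VERDICT (by name: the statement is the Claim_ definition above) =====
theorem group_by_owners_spec : Claim_equal_group_by_owners := by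
  intro files _
  show group_by_owners files = group_by_owners_alt files
  unfold group_by_owners group_by_owners_alt
  exact fold_items (PySem.Dict.ofList files).items
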